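-- pv_equiv track=rewrite | github.com/AllenHo2/Resume-Keyword-Identifier | src/stemmer.py | get_representative_word
-- ===== SOURCE A (Python) =====
-- from typing import List, Dict, Tuple
-- from collections import Counter
--
-- def get_representative_word(stem: str, original_words: List[str]) -> str:
--     if not original_words:
--         return stem
--
--     # Count frequency of each original form
--     word_counts = Counter(original_words)
--
--     # Get most common
--     most_common = word_counts.most_common()
--     max_count = most_common[0][1]
--
--     # If multiple words have same frequency, choose shortest
--     top_words = [word for word, count in most_common if count == max_count]
--     return min(top_words, key=len)
-- ===== SOURCE B (Python) =====
-- def get_representative_word(stem, original_words):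
--     # One linear pass over first-occurrence-ordered counts instead of sorting:
--     # keep the best (count desc, length asc, first occurrence) word seen so far.
--     counts = {}
--     for w in original_words:
--         counts[w] = counts.get(w, 0) + 1
--     best_word, best_count, best_len = stem, 0, 0
--     for w, c in counts.items():
--         l = len(w)
--         if c > best_count or (c == best_count and l < best_len):
--             best_word, best_count, best_len = w, c, l
--     return best_word
-- ===== Notes on version B (the rewrite author's own statement) =====
-- stated objective: alternative
-- what changed: B replaces A's Counter.most_common sort plus filter plus min(key=len) by a single linear pass over the first-occurrence-ordered counts that keeps the best (highest count, then shortest, then first-seen) word.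
import Mathlib
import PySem

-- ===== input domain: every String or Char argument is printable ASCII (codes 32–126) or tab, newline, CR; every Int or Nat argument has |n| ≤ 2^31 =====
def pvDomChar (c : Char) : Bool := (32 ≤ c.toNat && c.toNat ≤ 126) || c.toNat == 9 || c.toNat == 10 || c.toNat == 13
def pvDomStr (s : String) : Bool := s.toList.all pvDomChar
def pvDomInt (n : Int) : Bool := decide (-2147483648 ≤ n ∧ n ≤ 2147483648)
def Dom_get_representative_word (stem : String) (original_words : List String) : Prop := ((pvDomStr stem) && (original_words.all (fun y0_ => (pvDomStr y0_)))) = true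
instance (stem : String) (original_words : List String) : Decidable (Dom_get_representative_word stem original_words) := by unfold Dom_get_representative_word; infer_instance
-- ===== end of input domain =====

-- B replaces A's sort of the counts by a single linear pass that keeps the best
-- (highest count, then shortest, then first-occurring) word; same return value.

-- ===== PORT A =====
def get_representative_word (stem : String) (original_words : List String) : String :=
  if original_words = [] then stem
  else
    let word_counts := PySem.Dict.counter original_words
    let most_common := PySem.List.sorted word_counts.items (fun p => p.2) true
    let max_count : Int :=
      match PySem.List.pyGet? most_common 0 with
      | some p => p.2
      | none => 0  -- unreachable: most_common is nonempty here
    let top_words := (most_common.filter (fun p => p.2 == max_count)).map (fun p => p.1)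
    match PySem.List.min? top_words (fun w => PySem.Str.len w) with
    | some w => w
    | none => stem  -- unreachable: top_words is nonempty here

-- ===== PORT B =====
def get_representative_word_alt (stem : String) (original_words : List String) : String :=
  let counts := original_words.foldl (fun d w => d.insert w (d.getD w 0 + 1)) PySem.Dict.empty
  let best := counts.items.foldl
    (fun (b : String × Int × Int) q =>
      let l := PySem.Str.len q.1
      if b.2.1 < q.2 ∨ (q.2 = b.2.1 ∧ l < b.2.2) then (q.1, q.2, l) else b)
    (stem, 0, 0)
  best.1

-- ===== PRECONDITION & SPEC =====
def Spec_get_representative_word (stem : String) (original_words : List String) (out : String) : Prop := out = get_representative_word_alt stem original_words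
instance (stem : String) (original_words : List String) (out : String) : Decidable (Spec_get_representative_word stem original_words out) := by unfold Spec_get_representative_word; infer_instance

-- ===== CLAIM (what is proved, stated in full; the proofs are below) =====
def Claim_equal_get_representative_word : Prop := ∀ (stem : String) (original_words : List String), Dom_get_representative_word stem original_words → Spec_get_representative_word stem original_words (get_representative_word stem original_words)

-- ===== LEMMAS AND PROOFS =====

-- the strict "q is better than b" comparison of B's pass, on (word, count) pairs
def pvPick (p : String × Int) (t : List (String × Int)) : String × Int :=
  t.foldl (fun b q =>
    if b.2 < q.2 ∨ (q.2 = b.2 ∧ PySem.Str.len q.1 < PySem.Str.len b.1) then q else b) p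

theorem pvPick_nil (p : String × Int) : pvPick p [] = p := rfl

theorem pvPick_cons (p q : String × Int) (t : List (String × Int)) :
    pvPick p (q :: t) =
      pvPick (if p.2 < q.2 ∨ (q.2 = p.2 ∧ PySem.Str.len q.1 < PySem.Str.len p.1) then q else p) t := rfl

-- B's triple-state fold, once started, is pvPick decorated with the length
theorem pvFold_shape (t : List (String × Int)) (p : String × Int) :
    t.foldl
      (fun (b : String × Int × Int) q =>
        let l := PySem.Str.len q.1
        if b.2.1 < q.2 ∨ (q.2 = b.2.1 ∧ l < b.2.2) then (q.1, q.2, l) else b)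
      (p.1, p.2, PySem.Str.len p.1)
    = ((pvPick p t).1, (pvPick p t).2, PySem.Str.len (pvPick p t).1) := by
  induction t generalizing p with
  | nil => rfl
  | cons q t ih =>
    rw [pvPick_cons]
    simp only [List.foldl]
    split_ifs with h
    · exact ih q
    · exact ih p

-- insertBy with the descending-before keeps descending order
theorem pvPairwise_insertBy (x : String × Int) (acc : List (String × Int))
    (h : acc.Pairwise (fun a b => b.2 ≤ a.2)) :
    (PySem.List.insertBy (fun a b => decide (b.2 < a.2)) x acc).Pairwise (fun a b => b.2 ≤ a.2) := by
  induction acc with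
  | nil => simp [PySem.List.insertBy]
  | cons y ys ih =>
    rw [List.pairwise_cons] at h
    rw [PySem.List.insertBy]
    split_ifs with hb
    · simp only [decide_eq_true_eq] at hb
      refine List.Pairwise.cons ?_ (List.Pairwise.cons h.1 h.2)
      intro z hz
      rcases List.mem_cons.mp hz with rfl | hz
      · omega
      · have := h.1 z hz; omega
    · simp only [decide_eq_true_eq] at hb
      refine List.Pairwise.cons ?_ (ih h.2)
      intro z hz
      rcases (PySem.List.mem_insertBy _ _ _ _).mp hz with rfl | hz
      · omega
      · exact h.1 z hz

-- stability of the descending insertion at one count class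
theorem pvFilter_insertBy (x : String × Int) (acc : List (String × Int)) (K : Int)
    (h : acc.Pairwise (fun a b => b.2 ≤ a.2)) :
    (PySem.List.insertBy (fun a b => decide (b.2 < a.2)) x acc).filter (fun p => p.2 == K)
      = if x.2 == K then acc.filter (fun p => p.2 == K) ++ [x]
        else acc.filter (fun p => p.2 == K) := by
  induction acc with
  | nil =>
    rw [PySem.List.insertBy]
    split_ifs <;> simp_all
  | cons y ys ih =>
    rw [List.pairwise_cons] at h
    rw [PySem.List.insertBy]
    simp only [decide_eq_true_eq]
    split_ifs with hb hx hx
    · -- x goes in front of y :: ys and x.2 = K: nothing below has count K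
      simp only [beq_iff_eq] at hx
      have hyne : ¬ y.2 = K := by omega
      have hnil : ys.filter (fun p => p.2 == K) = [] := by
        rw [List.filter_eq_nil_iff]
        intro z hz
        have := h.1 z hz
        simp only [beq_iff_eq]
        omega
      have hy' : (y.2 == K) = false := by simp [hyne]
      simp [List.filter, hx, hy', hnil]
    · have hx' : (x.2 == K) = false := by simpa using hx
      simp [List.filter, hx']
    · simp only [List.filter]
      rw [ih h.2]
      simp only [hx, if_true]
      by_cases hy : (y.2 == K) = true <;> simp [hy]
    · simp only [List.filter]
      rw [ih h.2]
      rw [Bool.not_eq_true] at hx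
      by_cases hy : (y.2 == K) = true <;> simp [hy, hx]

-- the sort-building foldl is stable at each count class
theorem pvFoldl_filter (l : List (String × Int)) (acc : List (String × Int)) (K : Int)
    (h : acc.Pairwise (fun a b => b.2 ≤ a.2)) :
    (l.foldl (fun acc x => PySem.List.insertBy (fun a b => decide (b.2 < a.2)) x acc) acc).filter
        (fun p => p.2 == K)
      = acc.filter (fun p => p.2 == K) ++ l.filter (fun p => p.2 == K) := by
  induction l generalizing acc with
  | nil => simp
  | cons x l ih =>
    simp only [List.foldl, List.filter]
    rw [ih _ (pvPairwise_insertBy x acc h), pvFilter_insertBy x acc K h]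
    split_ifs with hx
    · simp [hx, List.append_assoc]
    · simp [hx]

theorem pvSorted_filter (l : List (String × Int)) (K : Int) :
    (PySem.List.sorted l (fun p => p.2) true).filter (fun p => p.2 == K)
      = l.filter (fun p => p.2 == K) := by
  have := pvFoldl_filter l [] K (by simp)
  simpa [PySem.List.sorted] using this

-- min? over two leading elements steps once
theorem pvMin?_two (a b : String × Int) (l : List (String × Int)) (key : String × Int → Int) :
    PySem.List.min? (a :: b :: l) key
      = PySem.List.min? ((if key b < key a then b else a) :: l) key := by
  simp only [PySem.List.min?, List.foldl]
  split_ifs <;> rfl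

theorem pvMin?_map (xs : List (String × Int)) :
    PySem.List.min? (xs.map (fun p => p.1)) (fun w => PySem.Str.len w)
      = Option.map (fun p => p.1) (PySem.List.min? xs (fun p => PySem.Str.len p.1)) := by
  have h : ∀ (f : Option String → String → Option String)
      (g : Option (String × Int) → (String × Int) → Option (String × Int)),
      (∀ acc x, f (Option.map (fun p => p.1) acc) x.1 = Option.map (fun p => p.1) (g acc x)) →
      ∀ (l : List (String × Int)) (acc : Option (String × Int)),
        List.foldl f (Option.map (fun p => p.1) acc) (l.map (fun p => p.1))
          = Option.map (fun p => p.1) (List.foldl g acc l) := by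
    intro f g hfg l
    induction l with
    | nil => intro acc; rfl
    | cons x t ih =>
      intro acc
      simp only [List.map, List.foldl]
      rw [hfg acc x, ih (g acc x)]
  simp only [PySem.List.min?]
  exact h _ _
    (by
      intro acc x
      cases acc with
      | none => rfl
      | some m =>
        simp only [Option.map_some]
        split_ifs <;> rfl)
    xs none

-- core: the linear pass computes the first (count, length)-minimal element,
-- i.e. min-by-length over the max-count class
theorem pvMain (t : List (String × Int)) (p : String × Int) (M : Int)
    (hp : p.2 ≤ M) (ht : ∀ q ∈ t, q.2 ≤ M) (hat : p.2 = M ∨ ∃ q ∈ t, q.2 = M) :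
    PySem.List.min? ((p :: t).filter (fun q => q.2 == M)) (fun q => PySem.Str.len q.1)
      = some (pvPick p t) := by
  induction t generalizing p with
  | nil =>
    have hpM : p.2 = M := by
      rcases hat with h | ⟨q, hq, _⟩
      · exact h
      · simp at hq
    rw [pvPick_nil]
    simp [List.filter, hpM, PySem.List.min?]
  | cons q t ih =>
    rw [pvPick_cons]
    have hq2 : q.2 ≤ M := ht q (by simp)
    have ht' : ∀ r ∈ t, r.2 ≤ M := fun r hr => ht r (by simp [hr])
    by_cases hpM : p.2 = M <;> by_cases hqM : q.2 = M
    · -- both in the max class: the pass keeps the shorter (first on a tie)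
      have hpb : (p.2 == M) = true := by simp [hpM]
      have hqb : (q.2 == M) = true := by simp [hqM]
      have hfil : (p :: q :: t).filter (fun r => r.2 == M)
          = p :: q :: t.filter (fun r => r.2 == M) := by
        simp [List.filter, hpb, hqb]
      rw [hfil, pvMin?_two]
      have hcond : (p.2 < q.2 ∨ (q.2 = p.2 ∧ PySem.Str.len q.1 < PySem.Str.len p.1))
          ↔ PySem.Str.len q.1 < PySem.Str.len p.1 := by
        constructor
        · rintro (h | ⟨-, h⟩)
          · omega
          · exact h
        · intro h
          exact Or.inr ⟨by omega, h⟩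
      have hstep : (if PySem.Str.len q.1 < PySem.Str.len p.1 then q else p)
          = (if p.2 < q.2 ∨ (q.2 = p.2 ∧ PySem.Str.len q.1 < PySem.Str.len p.1) then q else p) := by
        by_cases h1 : PySem.Str.len q.1 < PySem.Str.len p.1
        · rw [if_pos h1, if_pos (hcond.mpr h1)]
        · rw [if_neg h1, if_neg (fun hc => h1 (hcond.mp hc))]
      rw [hstep]
      by_cases hc : p.2 < q.2 ∨ (q.2 = p.2 ∧ PySem.Str.len q.1 < PySem.Str.len p.1)
      · rw [if_pos hc]
        have := ih q hq2 ht' (Or.inl hqM)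
        rwa [show (q :: t).filter (fun r => r.2 == M) = q :: t.filter (fun r => r.2 == M) by
          simp [List.filter, hqb]] at this
      · rw [if_neg hc]
        have := ih p hp ht' (Or.inl hpM)
        rwa [show (p :: t).filter (fun r => r.2 == M) = p :: t.filter (fun r => r.2 == M) by
          simp [List.filter, hpb]] at this
    · -- q below the max: it is filtered out and never replaces p
      have hqb : (q.2 == M) = false := by simp [hqM]
      have hfil : (p :: q :: t).filter (fun r => r.2 == M)
          = (p :: t).filter (fun r => r.2 == M) := by
        simp [List.filter, hqb]
      have hcond : ¬ (p.2 < q.2 ∨ (q.2 = p.2 ∧ PySem.Str.len q.1 < PySem.Str.len p.1)) := by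
        rintro (h | ⟨h, -⟩) <;> omega
      rw [hfil, if_neg hcond]
      exact ih p hp ht' (Or.inl hpM)
    · -- p below the max: it is filtered out and q replaces it
      have hpb : (p.2 == M) = false := by simp [hpM]
      have hfil : (p :: q :: t).filter (fun r => r.2 == M)
          = (q :: t).filter (fun r => r.2 == M) := by
        simp [List.filter, hpb]
      have hcond : p.2 < q.2 ∨ (q.2 = p.2 ∧ PySem.Str.len q.1 < PySem.Str.len p.1) := by
        left; omega
      rw [hfil, if_pos hcond]
      exact ih q hq2 ht' (Or.inl hqM)
    · -- neither reaches the max: both filtered out, the winner comes later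
      have hpb : (p.2 == M) = false := by simp [hpM]
      have hqb : (q.2 == M) = false := by simp [hqM]
      have hat' : ∃ r ∈ t, r.2 = M := by
        rcases hat with h | ⟨r, hr, hrM⟩
        · omega
        · rcases List.mem_cons.mp hr with rfl | hr
          · omega
          · exact ⟨r, hr, hrM⟩
      have hfil : (p :: q :: t).filter (fun r => r.2 == M)
          = t.filter (fun r => r.2 == M) := by
        simp [List.filter, hpb, hqb]
      rw [hfil]
      by_cases hcond : p.2 < q.2 ∨ (q.2 = p.2 ∧ PySem.Str.len q.1 < PySem.Str.len p.1)
      · rw [if_pos hcond]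
        have := ih q hq2 ht' (Or.inr hat')
        rwa [show (q :: t).filter (fun r => r.2 == M) = t.filter (fun r => r.2 == M) by
          simp [List.filter, hqb]] at this
      · rw [if_neg hcond]
        have := ih p hp ht' (Or.inr hat')
        rwa [show (p :: t).filter (fun r => r.2 == M) = t.filter (fun r => r.2 == M) by
          simp [List.filter, hpb]] at this

-- ===== VERDICT (by name: the statement is the Claim_ definition above) =====
theorem get_representative_word_spec : Claim_equal_get_representative_word := by
  unfold Claim_equal_get_representative_word Spec_get_representative_word
  intro stem ows _
  by_cases hn : ows = []
  · subst hn; rfl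
  -- counts in B are Counter(original_words)
  unfold get_representative_word get_representative_word_alt
  rw [if_neg hn]
  simp only [PySem.Dict.foldl_insert_getD_add_one_eq_counter]
  -- the item list is nonempty and every count is at least 1
  have hcount : ∀ q ∈ (PySem.Dict.counter ows).items, 1 ≤ q.2 := by
    intro q hq
    rw [PySem.Dict.items_counter] at hq
    rcases List.mem_map.mp hq with ⟨k, hk, rfl⟩
    have hk' : k ∈ ows := (PySem.Set.mem_ofList _ _).mp hk
    have : 0 < ows.count k := List.count_pos_iff.mpr hk'
    simpa using this
  have hLne : (PySem.Dict.counter ows).items ≠ [] := by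
    rw [PySem.Dict.items_counter]
    rcases List.exists_mem_of_ne_nil ows hn with ⟨w, hw⟩
    intro hmap
    rw [List.map_eq_nil_iff] at hmap
    exact (List.ne_nil_of_mem ((PySem.Set.mem_ofList _ _).mpr hw)) hmap
  obtain ⟨p, t, hL⟩ := List.exists_cons_of_ne_nil hLne
  rw [hL]
  -- the sorted list is nonempty; its head count is the maximum M
  have hSne : PySem.List.sorted ((PySem.Dict.counter ows).items) (fun p => p.2) true ≠ [] := by
    rw [Ne, PySem.List.sorted_eq_nil_iff]
    exact hLne
  obtain ⟨m, t', hS⟩ := List.exists_cons_of_ne_nil hSne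
  rw [hL] at hS
  rw [hS]
  have hub : ∀ y ∈ p :: t, y.2 ≤ m.2 := by
    have := PySem.List.key_head_sorted_rev_ge (p :: t) (fun r => r.2) hS
    exact this
  have hmmem : m ∈ p :: t := by
    have : m ∈ PySem.List.sorted (p :: t) (fun r => r.2) true := by rw [hS]; simp
    exact (PySem.List.mem_sorted _ _ _ _).mp this
  have hat : p.2 = m.2 ∨ ∃ q ∈ t, q.2 = m.2 := by
    rcases List.mem_cons.mp hmmem with rfl | hm
    · exact Or.inl rfl
    · exact Or.inr ⟨m, hm, rfl⟩
  -- A's pipeline: stable filter at the max class, then first length-minimum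
  have hA :
      PySem.List.pyGet? (m :: t') 0 = some m := by
    simp [PySem.List.pyGet?, PySem.List.pyIdx?]
  rw [hA]
  have hfil := pvSorted_filter (p :: t) m.2
  rw [hS] at hfil
  rw [hfil, pvMin?_map, pvMain t p m.2 (hub p (by simp)) (fun q hq => hub q (by simp [hq])) hat]
  -- B's pass: the first item always replaces the initial state
  have hfirst :
      (let l := PySem.Str.len p.1
       if (stem, (0 : Int), (0 : Int)).2.1 < p.2 ∨ (p.2 = (stem, (0 : Int), (0 : Int)).2.1 ∧ l < (stem, (0 : Int), (0 : Int)).2.2)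
       then (p.1, p.2, l) else (stem, (0 : Int), (0 : Int)))
      = (p.1, p.2, PySem.Str.len p.1) := by
    have h1 : (1 : Int) ≤ p.2 := hcount p (by rw [hL]; simp)
    simp only []
    rw [if_pos (Or.inl (by omega))]
  simp only [List.foldl]
  rw [hfirst, pvFold_shape]
  simp
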